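-- pv_equiv track=rewrite | github.com/AliNikkhah2001/edgeWash | training/preprocess_data.py | _discount_reaction_indeterminacy
-- ===== SOURCE A (Python) =====
-- from typing import List, Tuple, Optional
--
-- def _discount_reaction_indeterminacy(labels: List[int], reaction_frames: int) -> List[int]:
--     new_labels = [u for u in labels]
--     n = len(labels) - 1
--     for i in range(n):
--         if i == 0 or labels[i] != labels[i + 1] or i == n - 1:
--             start = max(0, i - reaction_frames)
--             end = i
--             for j in range(start, end):
--                 new_labels[j] = -1
--             start = i
--             end = min(n + 1, i + reaction_frames)
--             for j in range(start, end):
--                 new_labels[j] = -1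
--     return new_labels
-- ===== SOURCE B (Python) =====
-- from typing import List
--
-- def _discount_reaction_indeterminacy(labels: List[int], reaction_frames: int) -> List[int]:
--     m = len(labels)
--     n = m - 1
--     diff = [0] * (m + 1)
--     if reaction_frames > 0:
--         for i in range(n):
--             if i == 0 or labels[i] != labels[i + 1] or i == n - 1:
--                 diff[max(0, i - reaction_frames)] += 1
--                 diff[min(n + 1, i + reaction_frames)] -= 1
--     acc = 0
--     out = []
--     for k in range(m):
--         acc += diff[k]
--         out.append(-1 if acc > 0 else labels[k])
--     return out
-- ===== Notes on version B (the rewrite author's own statement) =====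
-- stated objective: faster
-- what changed: Replaces A's per-boundary inner marking loops (each writing up to 2*reaction_frames cells, re-written for every boundary) by a difference array: each boundary adds +1/-1 at its interval ends in O(1), and one prefix-sum pass over the frames decides -1 vs the original label.
import Mathlib
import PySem

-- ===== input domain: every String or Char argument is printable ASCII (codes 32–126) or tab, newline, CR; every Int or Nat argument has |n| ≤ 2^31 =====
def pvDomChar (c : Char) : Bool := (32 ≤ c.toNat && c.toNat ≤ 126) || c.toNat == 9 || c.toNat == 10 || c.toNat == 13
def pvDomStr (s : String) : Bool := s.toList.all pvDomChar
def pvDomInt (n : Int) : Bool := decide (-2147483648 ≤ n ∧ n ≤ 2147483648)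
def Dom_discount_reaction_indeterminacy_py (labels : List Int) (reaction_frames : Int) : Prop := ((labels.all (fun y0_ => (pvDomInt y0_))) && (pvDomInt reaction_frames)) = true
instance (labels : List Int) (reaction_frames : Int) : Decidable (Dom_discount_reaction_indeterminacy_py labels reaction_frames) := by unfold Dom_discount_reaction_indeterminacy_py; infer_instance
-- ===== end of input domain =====

-- B replaces A's per-boundary O(reaction_frames) marking loops by a difference array
-- plus one prefix-sum pass (asymptotically faster); return values are proved identical.

-- ===== PORT A =====
def discount_reaction_indeterminacy_py (labels : List Int) (reaction_frames : Int) : List Int :=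
  let new_labels := labels.map (fun u => u)
  let n : Int := PySem.List.len labels - 1
  (PySem.List.pyRange 0 n 1).foldl (fun nl i =>
    if i == 0 || PySem.List.pyGet? labels i != PySem.List.pyGet? labels (i + 1) || i == n - 1 then
      (PySem.List.pyRange i (min (n + 1) (i + reaction_frames)) 1).foldl
        (fun cur j => PySem.List.pySetD cur j (-1))
        ((PySem.List.pyRange (max 0 (i - reaction_frames)) i 1).foldl
          (fun cur j => PySem.List.pySetD cur j (-1)) nl)
    else nl) new_labels

-- ===== PORT B =====
def discount_reaction_indeterminacy_py_alt (labels : List Int) (reaction_frames : Int) : List Int :=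
  let m : Int := PySem.List.len labels
  let n : Int := m - 1
  let diff0 : List Int := List.replicate (labels.length + 1) 0
  let diff : List Int :=
    if reaction_frames > 0 then
      (PySem.List.pyRange 0 n 1).foldl (fun d i =>
        if i == 0 || PySem.List.pyGet? labels i != PySem.List.pyGet? labels (i + 1) || i == n - 1 then
          let d1 := PySem.List.pySetD d (max 0 (i - reaction_frames))
            (PySem.List.pyGetD d (max 0 (i - reaction_frames)) 0 + 1)
          PySem.List.pySetD d1 (min (n + 1) (i + reaction_frames))
            (PySem.List.pyGetD d1 (min (n + 1) (i + reaction_frames)) 0 - 1)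
        else d) diff0
    else diff0
  ((PySem.List.pyRange 0 m 1).foldl (fun (st : Int × List Int) k =>
      let acc := st.1 + PySem.List.pyGetD diff k 0
      (acc, st.2 ++ [if acc > 0 then (-1 : Int) else PySem.List.pyGetD labels k 0]))
    ((0 : Int), ([] : List Int))).2

-- ===== PRECONDITION & SPEC =====
def Spec_discount_reaction_indeterminacy_py (labels : List Int) (reaction_frames : Int) (out : List Int) : Prop := out = discount_reaction_indeterminacy_py_alt labels reaction_frames
instance (labels : List Int) (reaction_frames : Int) (out : List Int) : Decidable (Spec_discount_reaction_indeterminacy_py labels reaction_frames out) := by unfold Spec_discount_reaction_indeterminacy_py; infer_instance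

-- ===== CLAIM (what is proved, stated in full; the proofs are below) =====
def Claim_equal_discount_reaction_indeterminacy_py : Prop := ∀ (labels : List Int) (reaction_frames : Int), Dom_discount_reaction_indeterminacy_py labels reaction_frames → Spec_discount_reaction_indeterminacy_py labels reaction_frames (discount_reaction_indeterminacy_py labels reaction_frames)

-- ===== LEMMAS AND PROOFS =====

-- the boundary test of both programs, and the interval a boundary i marks
def pvCondB (labels : List Int) (n i : Int) : Bool :=
  i == 0 || PySem.List.pyGet? labels i != PySem.List.pyGet? labels (i + 1) || i == n - 1

def pvCoverB (rf n i k : Int) : Bool :=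
  (decide (max 0 (i - rf) ≤ k) && decide (k < i)) ||
  (decide (i ≤ k) && decide (k < min (n + 1) (i + rf)))

-- ---------- A side: a fold of pySetD writes over a range ----------

theorem pvMark_length (fuel : Nat) : ∀ (a b : Int), (b - a).toNat = fuel → 0 ≤ a →
    ∀ (cur : List Int),
    ((PySem.List.pyRange a b 1).foldl (fun c j => PySem.List.pySetD c j (-1)) cur).length
      = cur.length := by
  induction fuel with
  | zero =>
    intro a b hf ha cur
    rw [PySem.List.pyRange_one_eq_nil (by omega)]
    simp
  | succ f ih =>
    intro a b hf ha cur
    rw [PySem.List.pyRange_one_cons (by omega)]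
    simp only [List.foldl_cons]
    rw [ih (a + 1) b (by omega) (by omega)]
    simp

theorem pvMark_getElem? (fuel : Nat) : ∀ (a b : Int), (b - a).toNat = fuel → 0 ≤ a →
    ∀ (cur : List Int) (k : Nat), k < cur.length →
    ((PySem.List.pyRange a b 1).foldl (fun c j => PySem.List.pySetD c j (-1)) cur)[k]?
      = if a ≤ (k : Int) ∧ (k : Int) < b then some (-1) else cur[k]? := by
  induction fuel with
  | zero =>
    intro a b hf ha cur k hk
    rw [PySem.List.pyRange_one_eq_nil (by omega)]
    rw [if_neg (by omega)]
    simp only [List.foldl_nil]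
  | succ f ih =>
    intro a b hf ha cur k hk
    rw [PySem.List.pyRange_one_cons (by omega)]
    simp only [List.foldl_cons, PySem.List.pySetD_of_nonneg _ _ ha]
    rw [ih (a + 1) b (by omega) (by omega) _ k (by simpa using hk)]
    have hta : (a.toNat : Int) = a := Int.toNat_of_nonneg ha
    rw [List.getElem?_set]
    split_ifs <;> first | rfl | omega

theorem pvStepA_length (rf n i : Int) (hi0 : 0 ≤ i) (cnd : Bool) (cur : List Int) :
    ((if cnd = true then
        (PySem.List.pyRange i (min (n + 1) (i + rf)) 1).foldl
          (fun c j => PySem.List.pySetD c j (-1))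
          ((PySem.List.pyRange (max 0 (i - rf)) i 1).foldl
            (fun c j => PySem.List.pySetD c j (-1)) cur)
      else cur)).length = cur.length := by
  cases cnd
  · simp
  · rw [if_pos rfl]
    rw [pvMark_length _ i _ rfl hi0]
    exact pvMark_length _ _ _ rfl (by omega) cur

theorem pvStepA_getElem? (rf n i : Int) (hi0 : 0 ≤ i) (cnd : Bool) (cur : List Int)
    (k : Nat) (hk : k < cur.length) :
    ((if cnd = true then
        (PySem.List.pyRange i (min (n + 1) (i + rf)) 1).foldl
          (fun c j => PySem.List.pySetD c j (-1))
          ((PySem.List.pyRange (max 0 (i - rf)) i 1).foldl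
            (fun c j => PySem.List.pySetD c j (-1)) cur)
      else cur))[k]?
    = if (cnd && pvCoverB rf n i (k : Int)) = true then some (-1) else cur[k]? := by
  cases cnd
  · simp
  · rw [if_pos rfl]
    have hlen : ((PySem.List.pyRange (max 0 (i - rf)) i 1).foldl
        (fun c j => PySem.List.pySetD c j (-1)) cur).length = cur.length :=
      pvMark_length _ _ _ rfl (by omega) cur
    rw [pvMark_getElem? _ i _ rfl hi0 _ k (by rw [hlen]; exact hk)]
    rw [pvMark_getElem? _ (max 0 (i - rf)) i rfl (by omega) cur k hk]
    simp only [pvCoverB, Bool.true_and, Bool.or_eq_true, Bool.and_eq_true, decide_eq_true_eq]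
    split_ifs <;> first | rfl | tauto

theorem pvFoldA_length (rf n : Int) (c : Int → Bool) :
    ∀ (L : List Int), (∀ i ∈ L, 0 ≤ i) → ∀ (cur : List Int),
    (L.foldl (fun nl i =>
      if c i = true then
        (PySem.List.pyRange i (min (n + 1) (i + rf)) 1).foldl
          (fun cc j => PySem.List.pySetD cc j (-1))
          ((PySem.List.pyRange (max 0 (i - rf)) i 1).foldl
            (fun cc j => PySem.List.pySetD cc j (-1)) nl)
      else nl) cur).length = cur.length := by
  intro L
  induction L with
  | nil => intro _ cur; rfl
  | cons i L ih =>
    intro hL cur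
    simp only [List.foldl_cons]
    rw [ih (fun j hj => hL j (List.mem_cons_of_mem i hj))]
    exact pvStepA_length rf n i (hL i (List.mem_cons_self)) _ cur

theorem pvFoldA_getElem? (rf n : Int) (c : Int → Bool) :
    ∀ (L : List Int), (∀ i ∈ L, 0 ≤ i) → ∀ (cur : List Int) (k : Nat), k < cur.length →
    (L.foldl (fun nl i =>
      if c i = true then
        (PySem.List.pyRange i (min (n + 1) (i + rf)) 1).foldl
          (fun cc j => PySem.List.pySetD cc j (-1))
          ((PySem.List.pyRange (max 0 (i - rf)) i 1).foldl
            (fun cc j => PySem.List.pySetD cc j (-1)) nl)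
      else nl) cur)[k]?
    = if (L.any fun i => c i && pvCoverB rf n i (k : Int)) = true then some (-1) else cur[k]? := by
  intro L
  induction L with
  | nil => intro _ cur k hk; simp
  | cons i L ih =>
    intro hL cur k hk
    have hi0 : 0 ≤ i := hL i List.mem_cons_self
    simp only [List.foldl_cons, List.any_cons]
    rw [ih (fun j hj => hL j (List.mem_cons_of_mem i hj)) _ k
      (by rw [pvStepA_length rf n i hi0 (c i) cur]; exact hk)]
    rw [pvStepA_getElem? rf n i hi0 (c i) cur k hk]
    by_cases h1 : (c i && pvCoverB rf n i (k : Int)) = true <;>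
      by_cases h2 : (L.any fun i => c i && pvCoverB rf n i (k : Int)) = true <;>
        simp [h1, h2]

theorem pvA_length (labels : List Int) (rf : Int) :
    (discount_reaction_indeterminacy_py labels rf).length = labels.length := by
  unfold discount_reaction_indeterminacy_py
  simp only [PySem.List.len_eq]
  have hc : ∀ i : Int, (i == 0 || PySem.List.pyGet? labels i != PySem.List.pyGet? labels (i + 1)
      || i == (labels.length : Int) - 1 - 1)
      = pvCondB labels ((labels.length : Int) - 1) i := fun i => rfl
  simp only [hc]
  rw [pvFoldA_length rf ((labels.length : Int) - 1)
    (fun i => pvCondB labels ((labels.length : Int) - 1) i)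
    (PySem.List.pyRange 0 ((labels.length : Int) - 1) 1)
    (fun i hi => (PySem.List.mem_pyRange_one.mp hi).1) (labels.map (fun u => u))]
  simp

theorem pvA_getElem? (labels : List Int) (rf : Int) (k : Nat) (hk : k < labels.length) :
    (discount_reaction_indeterminacy_py labels rf)[k]?
      = if ((PySem.List.pyRange 0 ((labels.length : Int) - 1) 1).any fun i =>
            pvCondB labels ((labels.length : Int) - 1) i
              && pvCoverB rf ((labels.length : Int) - 1) i (k : Int)) = true
        then some (-1) else labels[k]? := by
  unfold discount_reaction_indeterminacy_py
  simp only [PySem.List.len_eq]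
  have hc : ∀ i : Int, (i == 0 || PySem.List.pyGet? labels i != PySem.List.pyGet? labels (i + 1)
      || i == (labels.length : Int) - 1 - 1)
      = pvCondB labels ((labels.length : Int) - 1) i := fun i => rfl
  simp only [hc]
  rw [pvFoldA_getElem? rf ((labels.length : Int) - 1)
    (fun i => pvCondB labels ((labels.length : Int) - 1) i)
    (PySem.List.pyRange 0 ((labels.length : Int) - 1) 1)
    (fun i hi => (PySem.List.mem_pyRange_one.mp hi).1) (labels.map (fun u => u)) k
    (by simpa using hk)]
  simp [pvCondB]

-- ---------- B side: prefix sums of the difference array ----------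

def pvPS (d : List Int) (k : Int) : Int :=
  ((PySem.List.pyRange 0 (k + 1) 1).map (fun t => PySem.List.pyGetD d t 0)).sum

theorem pvPS_neg_one (d : List Int) : pvPS d (-1) = 0 := by
  unfold pvPS
  rw [show (-1 : Int) + 1 = 0 by norm_num, PySem.List.pyRange_one_eq_nil (le_refl (0:Int))]
  rfl

theorem pvPS_succ (d : List Int) (k : Int) (hk : 0 ≤ k) :
    pvPS d k = pvPS d (k - 1) + PySem.List.pyGetD d k 0 := by
  unfold pvPS
  rw [show k - 1 + 1 = k from by ring,
    PySem.List.pyRange_one_succ_right hk]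
  simp

theorem pvPS_replicate (N : Nat) (k : Int) : pvPS (List.replicate N (0 : Int)) k = 0 := by
  unfold pvPS
  have h : ∀ t ∈ PySem.List.pyRange 0 (k + 1) 1,
      PySem.List.pyGetD (List.replicate N (0 : Int)) t 0 = 0 := by
    intro t ht
    rw [PySem.List.pyGetD_of_nonneg _ _ (PySem.List.mem_pyRange_one.mp ht).1]
    simp [List.getD_eq_getElem?_getD, List.getElem?_replicate]
    split <;> rfl
  rw [List.map_congr_left h]
  simp

theorem pvSum_update (f g : Int → Int) (t : Int)
    (h : ∀ x, 0 ≤ x → x ≠ t → f x = g x) :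
    ∀ (fuel : Nat) (N : Int), N.toNat = fuel →
    ((PySem.List.pyRange 0 N 1).map f).sum
      = ((PySem.List.pyRange 0 N 1).map g).sum + (if 0 ≤ t ∧ t < N then f t - g t else 0) := by
  intro fuel
  induction fuel with
  | zero =>
    intro N hN
    rw [PySem.List.pyRange_one_eq_nil (by omega), if_neg (by omega)]
    simp
  | succ f' ih =>
    intro N hN
    have hN1 : N = N - 1 + 1 := by omega
    rw [hN1, PySem.List.pyRange_one_succ_right (by omega : (0:Int) ≤ N - 1)]
    simp only [List.map_append, List.sum_append, List.map_cons, List.map_nil,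
      List.sum_cons, List.sum_nil]
    rw [ih (N - 1) (by omega)]
    by_cases ht : t = N - 1
    · subst ht
      rw [if_neg (by omega), if_pos (by omega)]
      ring
    · rw [h (N - 1) (by omega) (fun he => ht he.symm)]
      by_cases h2 : 0 ≤ t ∧ t < N - 1
      · rw [if_pos h2, if_pos (by omega)]; ring
      · rw [if_neg h2, if_neg (by omega)]; ring

theorem pvPS_set (d : List Int) (t : Nat) (ht : t < d.length) (v : Int) (k : Int) :
    pvPS (d.set t v) k
      = pvPS d k + (if (t : Int) ≤ k ∧ 0 ≤ k then v - d.getD t 0 else 0) := by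
  unfold pvPS
  have h : ∀ x : Int, 0 ≤ x → x ≠ (t : Int) →
      PySem.List.pyGetD (d.set t v) x 0 = PySem.List.pyGetD d x 0 := by
    intro x hx hxt
    rw [PySem.List.pyGetD_of_nonneg _ _ hx, PySem.List.pyGetD_of_nonneg _ _ hx]
    have hne : t ≠ x.toNat := by omega
    simp [List.getD_eq_getElem?_getD, hne]
  rw [pvSum_update (fun x => PySem.List.pyGetD (d.set t v) x 0)
    (fun x => PySem.List.pyGetD d x 0) (t : Int) h (k + 1).toNat (k + 1) rfl]
  congr 1
  by_cases hc : (t : Int) ≤ k ∧ 0 ≤ k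
  · rw [if_pos (by omega), if_pos hc]
    rw [PySem.List.pyGetD_of_nonneg _ _ (by positivity),
      PySem.List.pyGetD_of_nonneg _ _ (by positivity)]
    rw [show ((t : Int)).toNat = t from by omega]
    congr 1
    simp [List.getD_eq_getElem?_getD, ht]
  · rw [if_neg (by omega), if_neg hc]

theorem pvFoldB_ps (rf : Int) (hrf : 0 < rf) (m : Nat) (c : Int → Bool)
    (k : Int) (hk0 : 0 ≤ k) (hkm : k < (m : Int)) :
    ∀ (L : List Int), (∀ i ∈ L, 0 ≤ i ∧ i < (m : Int) - 1) →
    ∀ (d : List Int), d.length = m + 1 →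
    pvPS (L.foldl (fun d i =>
      if c i = true then
        PySem.List.pySetD
          (PySem.List.pySetD d (max 0 (i - rf)) (PySem.List.pyGetD d (max 0 (i - rf)) 0 + 1))
          (min ((m : Int) - 1 + 1) (i + rf))
          (PySem.List.pyGetD
            (PySem.List.pySetD d (max 0 (i - rf)) (PySem.List.pyGetD d (max 0 (i - rf)) 0 + 1))
            (min ((m : Int) - 1 + 1) (i + rf)) 0 - 1)
      else d) d) k
    = pvPS d k + ((L.countP fun i => c i && pvCoverB rf ((m : Int) - 1) i k) : Int) := by
  intro L
  induction L with
  | nil => intro _ d hd; simp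
  | cons i L ih =>
    intro hL d hd
    obtain ⟨hi0, hin⟩ := hL i List.mem_cons_self
    have hL' := fun j hj => hL j (List.mem_cons_of_mem i hj)
    simp only [List.foldl_cons, List.countP_cons]
    by_cases hc : c i = true
    · rw [if_pos hc]
      set lo : Int := max 0 (i - rf) with hlo
      set hi : Int := min ((m : Int) - 1 + 1) (i + rf) with hhi
      have hlo0 : (0 : Int) ≤ lo := le_max_left _ _
      have hlok : lo ≤ i := by omega
      have hik : i < hi := by omega
      have him : hi ≤ (m : Int) := by omega
      rw [PySem.List.pySetD_of_nonneg _ _ hlo0,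
        PySem.List.pySetD_of_nonneg _ _ (by omega : (0 : Int) ≤ hi),
        PySem.List.pyGetD_of_nonneg _ _ (by omega : (0 : Int) ≤ hi),
        PySem.List.pyGetD_of_nonneg _ _ hlo0]
      set d1 : List Int := d.set lo.toNat (d.getD lo.toNat 0 + 1) with hd1def
      have hd1len : d1.length = m + 1 := by rw [hd1def]; simp [hd]
      set d2 : List Int := d1.set hi.toNat (d1.getD hi.toNat 0 - 1) with hd2def
      have hd2len : d2.length = m + 1 := by rw [hd2def]; simp [hd1len]
      rw [ih hL' d2 hd2len]
      rw [hd2def, pvPS_set d1 hi.toNat (by omega) _ k]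
      rw [hd1def, pvPS_set d lo.toNat (by omega) _ k]
      have hiff : pvCoverB rf ((m : Int) - 1) i k = true ↔ (lo ≤ k ∧ k < hi) := by
        simp only [pvCoverB, Bool.or_eq_true, Bool.and_eq_true, decide_eq_true_eq]
        omega
      by_cases hB : pvCoverB rf ((m : Int) - 1) i k = true
      · have hcov := hiff.mp hB
        rw [if_pos (⟨by omega, hk0⟩ : (lo.toNat : Int) ≤ k ∧ 0 ≤ k)]
        rw [if_neg (by omega : ¬((hi.toNat : Int) ≤ k ∧ 0 ≤ k))]
        simp only [hc, hB, Bool.true_and, if_pos]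
        push_cast
        ring
      · have hnot : ¬(lo ≤ k ∧ k < hi) := fun hcv => hB (hiff.mpr hcv)
        have hBf : pvCoverB rf ((m : Int) - 1) i k = false := by
          cases hBv : pvCoverB rf ((m : Int) - 1) i k
          · rfl
          · exact absurd hBv hB
        simp only [hc, Bool.true_and, hBf, Bool.false_eq_true, if_false]
        push_cast
        split_ifs <;> omega
    · rw [if_neg hc, ih hL' d hd]
      simp [hc]

theorem pvFoldOut (labels d : List Int) :
    ∀ (fuel : Nat) (a : Int), 0 ≤ a → ((labels.length : Int) - a).toNat = fuel → ∀ (out0 : List Int),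
    ((PySem.List.pyRange a (labels.length : Int) 1).foldl (fun (st : Int × List Int) k =>
        (st.1 + PySem.List.pyGetD d k 0,
         st.2 ++ [if st.1 + PySem.List.pyGetD d k 0 > 0 then (-1 : Int)
                  else PySem.List.pyGetD labels k 0]))
      (pvPS d (a - 1), out0)).2
    = out0 ++ (PySem.List.pyRange a (labels.length : Int) 1).map
        (fun k => if pvPS d k > 0 then (-1 : Int) else PySem.List.pyGetD labels k 0) := by
  intro fuel
  induction fuel with
  | zero =>
    intro a ha hf out0
    rw [PySem.List.pyRange_one_eq_nil (by omega)]
    simp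
  | succ f ih =>
    intro a ha hf out0
    rw [PySem.List.pyRange_one_cons (by omega)]
    simp only [List.foldl_cons, List.map_cons]
    have hps : pvPS d (a - 1) + PySem.List.pyGetD d a 0 = pvPS d a := (pvPS_succ d a ha).symm
    simp only [hps]
    have hih := ih (a + 1) (by omega) (by omega)
      (out0 ++ [if pvPS d a > 0 then (-1 : Int) else PySem.List.pyGetD labels a 0])
    rw [show a + 1 - 1 = a from by ring] at hih
    rw [hih]
    simp

-- the difference array B builds (proof-side name for the fold inside the port of B)
def pvDiff (labels : List Int) (rf : Int) : List Int :=
  if rf > 0 then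
    (PySem.List.pyRange 0 ((labels.length : Int) - 1) 1).foldl (fun d i =>
      if pvCondB labels ((labels.length : Int) - 1) i = true then
        PySem.List.pySetD
          (PySem.List.pySetD d (max 0 (i - rf)) (PySem.List.pyGetD d (max 0 (i - rf)) 0 + 1))
          (min ((labels.length : Int) - 1 + 1) (i + rf))
          (PySem.List.pyGetD
            (PySem.List.pySetD d (max 0 (i - rf)) (PySem.List.pyGetD d (max 0 (i - rf)) 0 + 1))
            (min ((labels.length : Int) - 1 + 1) (i + rf)) 0 - 1)
      else d) (List.replicate (labels.length + 1) 0)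
  else List.replicate (labels.length + 1) 0

theorem pvB_eq (labels : List Int) (rf : Int) :
    discount_reaction_indeterminacy_py_alt labels rf
      = (PySem.List.pyRange 0 (labels.length : Int) 1).map
          (fun k => if pvPS (pvDiff labels rf) k > 0 then (-1 : Int)
                    else PySem.List.pyGetD labels k 0) := by
  have h := pvFoldOut labels (pvDiff labels rf) ((labels.length : Int) - 0).toNat 0
    le_rfl rfl []
  rw [show (0 : Int) - 1 = -1 from by ring, pvPS_neg_one] at h
  rw [List.nil_append] at h
  exact h

theorem pvPS_pvDiff (labels : List Int) (rf : Int) (hrf : 0 < rf) (k : Nat)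
    (hk : k < labels.length) :
    pvPS (pvDiff labels rf) (k : Int)
      = (((PySem.List.pyRange 0 ((labels.length : Int) - 1) 1).countP
          (fun i => pvCondB labels ((labels.length : Int) - 1) i
            && pvCoverB rf ((labels.length : Int) - 1) i (k : Int))) : Int) := by
  unfold pvDiff
  rw [if_pos hrf]
  have h := pvFoldB_ps rf hrf labels.length
    (fun i => pvCondB labels ((labels.length : Int) - 1) i) (k : Int)
    (by positivity) (by exact_mod_cast hk)
    (PySem.List.pyRange 0 ((labels.length : Int) - 1) 1)
    (fun i hi => ⟨(PySem.List.mem_pyRange_one.mp hi).1, (PySem.List.mem_pyRange_one.mp hi).2⟩)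
    (List.replicate (labels.length + 1) 0) (by simp)
  rw [pvPS_replicate] at h
  rw [h]
  ring

-- ===== VERDICT (by name: the statement is the Claim_ definition above) =====
theorem discount_reaction_indeterminacy_py_spec : Claim_equal_discount_reaction_indeterminacy_py := by
  intro labels rf _
  unfold Spec_discount_reaction_indeterminacy_py
  have hBlen : (discount_reaction_indeterminacy_py_alt labels rf).length = labels.length := by
    rw [pvB_eq]
    simp [PySem.List.length_pyRange_one]
  apply List.ext_getElem?
  intro k
  by_cases hk : k < labels.length
  · rw [pvA_getElem? labels rf k hk, pvB_eq]
    rw [PySem.List.getElem?_map_pyRange_zero _ labels.length k hk]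
    have hgd : PySem.List.pyGetD labels ((k : Nat) : Int) 0 = labels[k] := by
      rw [PySem.List.pyGetD_natCast]
      simp [List.getD_eq_getElem?_getD, List.getElem?_eq_getElem hk]
    by_cases hrf : 0 < rf
    · rw [pvPS_pvDiff labels rf hrf k hk]
      by_cases hany : ((PySem.List.pyRange 0 ((labels.length : Int) - 1) 1).any
          (fun i => pvCondB labels ((labels.length : Int) - 1) i
            && pvCoverB rf ((labels.length : Int) - 1) i (k : Int))) = true
      · rw [if_pos hany]
        obtain ⟨i, hiM, hip⟩ := List.any_eq_true.mp hany
        have hpos : 0 < ((PySem.List.pyRange 0 ((labels.length : Int) - 1) 1).countP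
            (fun i => pvCondB labels ((labels.length : Int) - 1) i
              && pvCoverB rf ((labels.length : Int) - 1) i (k : Int))) :=
          List.countP_pos_iff.mpr ⟨i, hiM, hip⟩
        rw [if_pos (by exact_mod_cast hpos)]
      · rw [if_neg hany]
        have hz : ((PySem.List.pyRange 0 ((labels.length : Int) - 1) 1).countP
            (fun i => pvCondB labels ((labels.length : Int) - 1) i
              && pvCoverB rf ((labels.length : Int) - 1) i (k : Int))) = 0 := by
          by_contra hnz
          exact hany (List.any_eq_true.mpr (List.countP_pos_iff.mp (Nat.pos_of_ne_zero hnz)))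
        rw [if_neg (by simp [hz])]
        rw [List.getElem?_eq_getElem hk, hgd]
    · -- rf ≤ 0: nothing is ever marked on either side
      have hany : ((PySem.List.pyRange 0 ((labels.length : Int) - 1) 1).any
          (fun i => pvCondB labels ((labels.length : Int) - 1) i
            && pvCoverB rf ((labels.length : Int) - 1) i (k : Int))) = false := by
        rw [List.any_eq_false]
        intro i hi
        have h0 : 0 ≤ i := (PySem.List.mem_pyRange_one.mp hi).1
        simp only [Bool.and_eq_true, pvCoverB, Bool.or_eq_true, decide_eq_true_eq]
        rintro ⟨-, hcov | hcov⟩ <;> omega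
      rw [hany]
      simp only [Bool.false_eq_true, if_false]
      have hdz : pvDiff labels rf = List.replicate (labels.length + 1) 0 := by
        unfold pvDiff
        rw [if_neg hrf]
      rw [hdz, pvPS_replicate]
      rw [List.getElem?_eq_getElem hk, hgd]
      norm_num
  · have h1 : (discount_reaction_indeterminacy_py labels rf)[k]? = none :=
      List.getElem?_eq_none (by rw [pvA_length]; omega)
    have h2 : (discount_reaction_indeterminacy_py_alt labels rf)[k]? = none :=
      List.getElem?_eq_none (by rw [hBlen]; omega)
    rw [h1, h2]
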